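-- pv_equiv track=rewrite | github.com/shankarsingh077/Planetary-Intelligence-Platform | services/experience-plane/triage-api/src/triage_api/cascade_routes.py | _select_exposure_lines
-- ===== SOURCE A (Python) =====
-- from typing import Any
--
-- SPECIFIC_IMPACT_NOTES = {
--     "Crude Oil": "Prompt oil cargoes and refinery feedstock pricing would be the first market to reprice.",
--     "LPG": "Cooking fuel and petrochemical feedstock markets would tighten quickly, especially for import-heavy Asian buyers.",
--     "LNG": "Spot LNG replacement cargoes would become more expensive and harder to secure on short notice.",
--     "Natural Gas": "Gas balances would tighten after LNG and pipeline-linked pricing starts moving higher.",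
--     "Oil Prices": "Benchmark crude would reprice first, lifting transport, fuel, and input costs across the system.",
--     "Gas Prices": "Gas-sensitive utilities and industrial buyers would face higher procurement costs within days.",
--     "Diesel Prices": "Trucking, farm operations, and industrial logistics usually feel this kind of repricing quickly.",
--     "Jet Fuel Prices": "Airlines and air cargo operators would see fuel costs move up before ticket prices fully adjust.",
--     "Energy Supply Chain": "Refining, storage, fuel distribution, and cargo scheduling would all absorb the first operational stress.",
--     "Refining Sector": "Refiners would face tighter feedstock economics and more volatile product margins.",
--     "Power Utilities": "Utilities would have to absorb higher fuel input costs or pass them through into power prices.",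
--     "Petrochemical Industry": "Chemical producers would face feedstock cost pressure before downstream goods reprice.",
--     "Global Shipping": "Expect rerouting, longer voyage times, and more congestion at substitute routes or hubs.",
--     "Shipping Rates (BDI)": "Freight benchmarks usually move after rerouting and longer voyages start tying up vessel capacity.",
--     "Container Freight Rates": "Container costs would rise as carriers stretch routes, capacity, and insurance assumptions.",
--     "War Risk Insurance": "Insurers would likely reprice exposed routes quickly, raising voyage costs even before trade volumes fall.",
--     "Industrial Manufacturing": "Manufacturers would face tighter margins from higher power, freight, and input costs.",
--     "Agriculture Sector": "Farm economics would come under pressure through fertilizer, diesel, and transport costs.",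
--     "Food Supply Chain": "Food processors and importers would start absorbing higher freight and input costs.",
--     "Food Price Index": "Food inflation usually appears later, once freight, fertilizer, and energy costs flow through inventories.",
--     "Global Trade": "Trade volumes usually weaken later, once freight, insurance, and financing costs stay elevated.",
--     "Global Inflation": "Broader inflation pressure appears only if the initial shock persists long enough to move through prices and wages.",
--     "Financial Markets": "Rates, FX, and equities would react once traders believe the shock will last beyond the initial headline.",
--     "Semiconductors": "Chip availability and lead times would tighten fastest for downstream electronics and auto supply chains.",
--     "Semiconductor Supply Chain": "Production, packaging, and cross-border delivery lead times would likely lengthen first.",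
--     "Semiconductor Index": "Semiconductor equities would react quickly to any sign of prolonged production or logistics stress.",
--     "Consumer Electronics": "Device makers would face component timing and freight cost pressure before retail prices move.",
--     "Automotive Industry": "Automotive production is sensitive to both chip availability and transport delays.",
--     "Defense Industry": "Defense suppliers are exposed when electronics, specialty metals, or strategic transport become constrained.",
--     "Airlines": "Airlines would face a near-term margin squeeze from higher jet fuel and insurance costs.",
--     "Japan": "Japan is highly sensitive to imported oil and LNG disruptions, so replacement cargo costs rise quickly.",
--     "India": "India is exposed through imported crude, LPG, and freight costs that feed directly into energy and food bills.",
--     "South Korea": "South Korea is highly exposed to imported energy and trade-linked manufacturing costs.",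
--     "China": "China would feel the shock through commodity imports, industrial inputs, and shipping costs.",
--     "Germany": "Germany is exposed through imported energy, manufacturing inputs, and trade-sensitive industry.",
-- }
--
-- GENERIC_TYPE_NOTES = {
--     "country": "This country is linked to the disruption through a direct import, production, or logistics dependency in the graph.",
--     "index": "This market indicator would move only if the initial shock lasts long enough to change real pricing behavior.",
--     "sector": "This sector would absorb the shock through cost, transport, or supply constraints rather than immediate physical disruption.",
--     "commodity": "This commodity sits close to the initial shock and would feel price or availability pressure first.",
--     "chokepoint": "This route becomes relevant because traffic can be diverted toward or away from it as the disruption evolves.",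
--     "port": "This port matters as carriers rebalance routes, capacity, and turnaround times.",
--     "company": "This company is exposed because it sits on a concentrated part of the supply chain.",
-- }
--
-- def _dedupe_lines(items: list[str], limit: int) -> list[str]:
--     seen: set[str] = set()
--     lines: list[str] = []
--     for item in items:
--         if not item or item in seen:
--             continue
--         seen.add(item)
--         lines.append(item)
--         if len(lines) >= limit:
--             break
--     return lines
--
-- def _impact_note_for_result(result: dict[str, Any]) -> str:
--     node = result.get("node", "")
--     node_type = result.get("type", "")
--     return SPECIFIC_IMPACT_NOTES.get(node, GENERIC_TYPE_NOTES.get(node_type, "This node becomes more exposed as the disruption propagates outward."))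
--
-- def _compose_outlook_line(result: dict[str, Any]) -> str:
--     return f"{result['node']}: {_impact_note_for_result(result)}"
--
-- def _select_exposure_lines(results: list[dict[str, Any]], limit: int = 4) -> list[str]:
--     prioritized = (
--         [result for result in results if result.get("type") == "country"]
--         + [result for result in results if result.get("type") == "sector"]
--         + [result for result in results if result.get("type") == "index"]
--     )
--     if not prioritized:
--         prioritized = results
--     return _dedupe_lines([_compose_outlook_line(result) for result in prioritized], limit)
-- ===== SOURCE B (Python) =====
-- SPECIFIC_IMPACT_NOTES = {
--     "Crude Oil": "Prompt oil cargoes and refinery feedstock pricing would be the first market to reprice.",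
--     "LPG": "Cooking fuel and petrochemical feedstock markets would tighten quickly, especially for import-heavy Asian buyers.",
--     "LNG": "Spot LNG replacement cargoes would become more expensive and harder to secure on short notice.",
--     "Natural Gas": "Gas balances would tighten after LNG and pipeline-linked pricing starts moving higher.",
--     "Oil Prices": "Benchmark crude would reprice first, lifting transport, fuel, and input costs across the system.",
--     "Gas Prices": "Gas-sensitive utilities and industrial buyers would face higher procurement costs within days.",
--     "Diesel Prices": "Trucking, farm operations, and industrial logistics usually feel this kind of repricing quickly.",
--     "Jet Fuel Prices": "Airlines and air cargo operators would see fuel costs move up before ticket prices fully adjust.",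
--     "Energy Supply Chain": "Refining, storage, fuel distribution, and cargo scheduling would all absorb the first operational stress.",
--     "Refining Sector": "Refiners would face tighter feedstock economics and more volatile product margins.",
--     "Power Utilities": "Utilities would have to absorb higher fuel input costs or pass them through into power prices.",
--     "Petrochemical Industry": "Chemical producers would face feedstock cost pressure before downstream goods reprice.",
--     "Global Shipping": "Expect rerouting, longer voyage times, and more congestion at substitute routes or hubs.",
--     "Shipping Rates (BDI)": "Freight benchmarks usually move after rerouting and longer voyages start tying up vessel capacity.",
--     "Container Freight Rates": "Container costs would rise as carriers stretch routes, capacity, and insurance assumptions.",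
--     "War Risk Insurance": "Insurers would likely reprice exposed routes quickly, raising voyage costs even before trade volumes fall.",
--     "Industrial Manufacturing": "Manufacturers would face tighter margins from higher power, freight, and input costs.",
--     "Agriculture Sector": "Farm economics would come under pressure through fertilizer, diesel, and transport costs.",
--     "Food Supply Chain": "Food processors and importers would start absorbing higher freight and input costs.",
--     "Food Price Index": "Food inflation usually appears later, once freight, fertilizer, and energy costs flow through inventories.",
--     "Global Trade": "Trade volumes usually weaken later, once freight, insurance, and financing costs stay elevated.",
--     "Global Inflation": "Broader inflation pressure appears only if the initial shock persists long enough to move through prices and wages.",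
--     "Financial Markets": "Rates, FX, and equities would react once traders believe the shock will last beyond the initial headline.",
--     "Semiconductors": "Chip availability and lead times would tighten fastest for downstream electronics and auto supply chains.",
--     "Semiconductor Supply Chain": "Production, packaging, and cross-border delivery lead times would likely lengthen first.",
--     "Semiconductor Index": "Semiconductor equities would react quickly to any sign of prolonged production or logistics stress.",
--     "Consumer Electronics": "Device makers would face component timing and freight cost pressure before retail prices move.",
--     "Automotive Industry": "Automotive production is sensitive to both chip availability and transport delays.",
--     "Defense Industry": "Defense suppliers are exposed when electronics, specialty metals, or strategic transport become constrained.",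
--     "Airlines": "Airlines would face a near-term margin squeeze from higher jet fuel and insurance costs.",
--     "Japan": "Japan is highly sensitive to imported oil and LNG disruptions, so replacement cargo costs rise quickly.",
--     "India": "India is exposed through imported crude, LPG, and freight costs that feed directly into energy and food bills.",
--     "South Korea": "South Korea is highly exposed to imported energy and trade-linked manufacturing costs.",
--     "China": "China would feel the shock through commodity imports, industrial inputs, and shipping costs.",
--     "Germany": "Germany is exposed through imported energy, manufacturing inputs, and trade-sensitive industry.",
-- }
--
-- GENERIC_TYPE_NOTES = {
--     "country": "This country is linked to the disruption through a direct import, production, or logistics dependency in the graph.",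
--     "index": "This market indicator would move only if the initial shock lasts long enough to change real pricing behavior.",
--     "sector": "This sector would absorb the shock through cost, transport, or supply constraints rather than immediate physical disruption.",
--     "commodity": "This commodity sits close to the initial shock and would feel price or availability pressure first.",
--     "chokepoint": "This route becomes relevant because traffic can be diverted toward or away from it as the disruption evolves.",
--     "port": "This port matters as carriers rebalance routes, capacity, and turnaround times.",
--     "company": "This company is exposed because it sits on a concentrated part of the supply chain.",
-- }
--
-- _PRIORITY = {"country": 0, "sector": 1, "index": 2}
--
--
-- def _select_exposure_lines(results, limit=4):
--     candidates = [r for r in results if r.get("type") in _PRIORITY] or results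
--     prioritized = sorted(candidates, key=lambda r: _PRIORITY.get(r.get("type"), 3))
--     seen = set()
--     lines = []
--     for result in prioritized:
--         node = result.get("node", "")
--         note = SPECIFIC_IMPACT_NOTES.get(
--             node, GENERIC_TYPE_NOTES.get(result.get("type", ""),
--                                          "This node becomes more exposed as the disruption propagates outward."))
--         line = f"{result['node']}: {note}"
--         if line and line not in seen:
--             seen.add(line)
--             lines.append(line)
--             if len(lines) >= limit:
--                 break
--     return lines
-- ===== Notes on version B (the rewrite author's own statement) =====
-- stated objective: alternative
-- what changed: Replaces A's three concatenated filter passes over results by one filter into candidates plus a single stable sort on a priority key, and fuses line composition into the dedupe loop instead of an eager map pass (so B also stays lazy where A composes every line up front).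
import Mathlib
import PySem

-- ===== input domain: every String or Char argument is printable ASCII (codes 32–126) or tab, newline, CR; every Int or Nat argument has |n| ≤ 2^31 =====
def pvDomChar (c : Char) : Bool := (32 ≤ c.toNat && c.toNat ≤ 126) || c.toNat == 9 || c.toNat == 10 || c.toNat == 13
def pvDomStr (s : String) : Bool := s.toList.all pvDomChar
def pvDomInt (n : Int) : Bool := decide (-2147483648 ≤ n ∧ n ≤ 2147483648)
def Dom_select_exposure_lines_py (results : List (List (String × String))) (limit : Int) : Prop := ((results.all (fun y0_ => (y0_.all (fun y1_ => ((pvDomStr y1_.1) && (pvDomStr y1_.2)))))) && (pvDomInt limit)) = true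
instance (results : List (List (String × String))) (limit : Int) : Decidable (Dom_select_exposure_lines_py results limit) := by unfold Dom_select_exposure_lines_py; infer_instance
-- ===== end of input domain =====

-- ===== PORT A =====
-- B replaces A's three concatenated filter passes by one filter plus one stable sort on a
-- priority key, and fuses line composition into the dedupe loop; same return value (alternative
-- decomposition, not claimed faster).

-- shared literal tables (the module-level note dicts; no duplicate keys, so first-match lookup = dict.get)
def pvSpecificNotes : List (String × String) :=
  [("Crude Oil", "Prompt oil cargoes and refinery feedstock pricing would be the first market to reprice."),
   ("LPG", "Cooking fuel and petrochemical feedstock markets would tighten quickly, especially for import-heavy Asian buyers."),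
   ("LNG", "Spot LNG replacement cargoes would become more expensive and harder to secure on short notice."),
   ("Natural Gas", "Gas balances would tighten after LNG and pipeline-linked pricing starts moving higher."),
   ("Oil Prices", "Benchmark crude would reprice first, lifting transport, fuel, and input costs across the system."),
   ("Gas Prices", "Gas-sensitive utilities and industrial buyers would face higher procurement costs within days."),
   ("Diesel Prices", "Trucking, farm operations, and industrial logistics usually feel this kind of repricing quickly."),
   ("Jet Fuel Prices", "Airlines and air cargo operators would see fuel costs move up before ticket prices fully adjust."),
   ("Energy Supply Chain", "Refining, storage, fuel distribution, and cargo scheduling would all absorb the first operational stress."),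
   ("Refining Sector", "Refiners would face tighter feedstock economics and more volatile product margins."),
   ("Power Utilities", "Utilities would have to absorb higher fuel input costs or pass them through into power prices."),
   ("Petrochemical Industry", "Chemical producers would face feedstock cost pressure before downstream goods reprice."),
   ("Global Shipping", "Expect rerouting, longer voyage times, and more congestion at substitute routes or hubs."),
   ("Shipping Rates (BDI)", "Freight benchmarks usually move after rerouting and longer voyages start tying up vessel capacity."),
   ("Container Freight Rates", "Container costs would rise as carriers stretch routes, capacity, and insurance assumptions."),
   ("War Risk Insurance", "Insurers would likely reprice exposed routes quickly, raising voyage costs even before trade volumes fall."),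
   ("Industrial Manufacturing", "Manufacturers would face tighter margins from higher power, freight, and input costs."),
   ("Agriculture Sector", "Farm economics would come under pressure through fertilizer, diesel, and transport costs."),
   ("Food Supply Chain", "Food processors and importers would start absorbing higher freight and input costs."),
   ("Food Price Index", "Food inflation usually appears later, once freight, fertilizer, and energy costs flow through inventories."),
   ("Global Trade", "Trade volumes usually weaken later, once freight, insurance, and financing costs stay elevated."),
   ("Global Inflation", "Broader inflation pressure appears only if the initial shock persists long enough to move through prices and wages."),
   ("Financial Markets", "Rates, FX, and equities would react once traders believe the shock will last beyond the initial headline."),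
   ("Semiconductors", "Chip availability and lead times would tighten fastest for downstream electronics and auto supply chains."),
   ("Semiconductor Supply Chain", "Production, packaging, and cross-border delivery lead times would likely lengthen first."),
   ("Semiconductor Index", "Semiconductor equities would react quickly to any sign of prolonged production or logistics stress."),
   ("Consumer Electronics", "Device makers would face component timing and freight cost pressure before retail prices move."),
   ("Automotive Industry", "Automotive production is sensitive to both chip availability and transport delays."),
   ("Defense Industry", "Defense suppliers are exposed when electronics, specialty metals, or strategic transport become constrained."),
   ("Airlines", "Airlines would face a near-term margin squeeze from higher jet fuel and insurance costs."),
   ("Japan", "Japan is highly sensitive to imported oil and LNG disruptions, so replacement cargo costs rise quickly."),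
   ("India", "India is exposed through imported crude, LPG, and freight costs that feed directly into energy and food bills."),
   ("South Korea", "South Korea is highly exposed to imported energy and trade-linked manufacturing costs."),
   ("China", "China would feel the shock through commodity imports, industrial inputs, and shipping costs."),
   ("Germany", "Germany is exposed through imported energy, manufacturing inputs, and trade-sensitive industry.")]

def pvGenericNotes : List (String × String) :=
  [("country", "This country is linked to the disruption through a direct import, production, or logistics dependency in the graph."),
   ("index", "This market indicator would move only if the initial shock lasts long enough to change real pricing behavior."),
   ("sector", "This sector would absorb the shock through cost, transport, or supply constraints rather than immediate physical disruption."),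
   ("commodity", "This commodity sits close to the initial shock and would feel price or availability pressure first."),
   ("chokepoint", "This route becomes relevant because traffic can be diverted toward or away from it as the disruption evolves."),
   ("port", "This port matters as carriers rebalance routes, capacity, and turnaround times."),
   ("company", "This company is exposed because it sits on a concentrated part of the supply chain.")]

def pvFallbackNote : String := "This node becomes more exposed as the disruption propagates outward."

-- A-side helpers: _impact_note_for_result and _compose_outlook_line (result['node'] defaulted; Pre_ excludes the KeyError inputs)
def pvImpactNote (r : List (String × String)) : String :=
  let node := (List.lookup "node" r).getD ""
  let nodeType := (List.lookup "type" r).getD ""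
  (List.lookup node pvSpecificNotes).getD ((List.lookup nodeType pvGenericNotes).getD pvFallbackNote)

def pvComposeLine (r : List (String × String)) : String :=
  (List.lookup "node" r).getD "" ++ ": " ++ pvImpactNote r

-- A-side helper: _dedupe_lines (loop with seen set, append, break once len(lines) >= limit)
def pvDedupeGo : Int → PySem.Set String → List String → List String → List String
  | _, _, lines, [] => lines
  | limit, seen, lines, item :: rest =>
    if item = "" || seen.contains item then pvDedupeGo limit seen lines rest
    else
      let lines' := lines ++ [item]
      if (lines'.length : Int) ≥ limit then lines'
      else pvDedupeGo limit (seen.add item) lines' rest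

def select_exposure_lines_py (results : List (List (String × String))) (limit : Int) : List String :=
  let prioritized :=
    (results.filter (fun r => List.lookup "type" r == some "country"))
      ++ (results.filter (fun r => List.lookup "type" r == some "sector"))
      ++ (results.filter (fun r => List.lookup "type" r == some "index"))
  let prioritized := if prioritized.isEmpty then results else prioritized
  pvDedupeGo limit PySem.Set.empty [] (prioritized.map pvComposeLine)

-- ===== PORT B =====
-- B-side helpers: membership in the priority dict, and the sort key _PRIORITY.get(r.get("type"), 3)
def pvIsPrio (r : List (String × String)) : Bool :=
  match List.lookup "type" r with
  | some t => t == "country" || t == "sector" || t == "index"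
  | none => false

def pvPrioKey (r : List (String × String)) : Int :=
  match List.lookup "type" r with
  | some t => if t = "country" then 0 else if t = "sector" then 1 else if t = "index" then 2 else 3
  | none => 3

-- B-side: the fused compose-and-dedupe loop over the sorted results
def pvAltGo : Int → PySem.Set String → List String → List (List (String × String)) → List String
  | _, _, lines, [] => lines
  | limit, seen, lines, r :: rest =>
    let node := (List.lookup "node" r).getD ""
    let note := (List.lookup node pvSpecificNotes).getD
      ((List.lookup ((List.lookup "type" r).getD "") pvGenericNotes).getD pvFallbackNote)
    let line := node ++ ": " ++ note
    if line = "" || seen.contains line then pvAltGo limit seen lines rest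
    else
      let lines' := lines ++ [line]
      if (lines'.length : Int) ≥ limit then lines'
      else pvAltGo limit (seen.add line) lines' rest

def select_exposure_lines_py_alt (results : List (List (String × String))) (limit : Int) : List String :=
  let candidates := results.filter pvIsPrio
  let candidates := if candidates.isEmpty then results else candidates
  pvAltGo limit PySem.Set.empty [] (PySem.List.sorted candidates pvPrioKey)

-- ===== PRECONDITION & SPEC =====
-- Pre_ excludes exactly the inputs where Python A raises KeyError: some result in the prioritized
-- list (the priority-typed results, or all results when none is priority-typed) has no "node" key.
def Pre_select_exposure_lines_py (results : List (List (String × String))) (limit : Int) : Prop :=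
  (let c := results.filter pvIsPrio
   (if c.isEmpty then results else c).all (fun r => (List.lookup "node" r).isSome)) = true
instance (results : List (List (String × String))) (limit : Int) : Decidable (Pre_select_exposure_lines_py results limit) := by unfold Pre_select_exposure_lines_py; infer_instance

def pvWitness_select_exposure_lines_py : (List (List (String × String))) × Int :=
  ([[("node", "Japan"), ("type", "country")], [("node", "Airlines"), ("type", "sector")]], 4)

def Spec_select_exposure_lines_py (results : List (List (String × String))) (limit : Int) (out : List String) : Prop := out = select_exposure_lines_py_alt results limit
instance (results : List (List (String × String))) (limit : Int) (out : List String) : Decidable (Spec_select_exposure_lines_py results limit out) := by unfold Spec_select_exposure_lines_py; infer_instance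

-- ===== CLAIM (what is proved, stated in full; the proofs are below) =====
def Claim_equal_select_exposure_lines_py : Prop := ∀ (results : List (List (String × String))) (limit : Int), Dom_select_exposure_lines_py results limit → Pre_select_exposure_lines_py results limit → Spec_select_exposure_lines_py results limit (select_exposure_lines_py results limit)

-- ===== LEMMAS AND PROOFS =====

-- the fused B loop computes the dedupe of the composed lines
theorem pvGo_fuse (l : List (List (String × String))) : ∀ (limit : Int) (seen : PySem.Set String) (lines : List String),
    pvDedupeGo limit seen lines (l.map pvComposeLine) = pvAltGo limit seen lines l := by
  induction l with
  | nil => intro limit seen lines; rfl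
  | cons r rest ih =>
    intro limit seen lines
    simp only [List.map_cons, pvDedupeGo, pvAltGo, pvComposeLine, pvImpactNote, ih]

theorem pvInsertBy_append {α : Type} (before : α → α → Bool) (x : α) (p q : List α)
    (h : ∀ y ∈ p, before x y = false) :
    PySem.List.insertBy before x (p ++ q) = p ++ PySem.List.insertBy before x q := by
  induction p with
  | nil => simp
  | cons y ys ih =>
    simp only [List.cons_append, PySem.List.insertBy, h y (by simp)]
    simp only [Bool.false_eq_true, if_false]
    rw [ih (fun z hz => h z (by simp [hz]))]

theorem pvInsertBy_cons_all {α : Type} (before : α → α → Bool) (x : α) (q : List α)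
    (h : ∀ y ∈ q, before x y = true) :
    PySem.List.insertBy before x q = x :: q := by
  cases q with
  | nil => rfl
  | cons y ys => simp [PySem.List.insertBy, h y (by simp)]

-- a stable insertion sort by a {0,1,2}-valued key is the concatenation of the three key groups
theorem pvFoldl_insertBy_groups {α : Type} (k : α → Int) : ∀ (xs a b c : List α),
    (∀ x ∈ xs, k x = 0 ∨ k x = 1 ∨ k x = 2) →
    (∀ y ∈ a, k y = 0) → (∀ y ∈ b, k y = 1) → (∀ y ∈ c, k y = 2) →
    xs.foldl (fun acc x => PySem.List.insertBy (fun p q => decide (k p < k q)) x acc) (a ++ b ++ c)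
      = (a ++ xs.filter (fun x => k x == 0)) ++ ((b ++ xs.filter (fun x => k x == 1)) ++ (c ++ xs.filter (fun x => k x == 2))) := by
  intro xs
  induction xs with
  | nil => intro a b c _ _ _ _; simp
  | cons x xs ih =>
    intro a b c hx ha hb hc
    have hxs : ∀ y ∈ xs, k y = 0 ∨ k y = 1 ∨ k y = 2 := fun y hy => hx y (by simp [hy])
    simp only [List.foldl_cons]
    rcases hx x (by simp) with h0 | h1 | h2
    · have hstep : PySem.List.insertBy (fun p q => decide (k p < k q)) x (a ++ b ++ c)
          = (a ++ [x]) ++ b ++ c := by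
        rw [List.append_assoc, pvInsertBy_append _ _ a (b ++ c)
          (fun y hy => by simp [ha y hy, h0]),
          pvInsertBy_cons_all _ _ (b ++ c)
          (fun y hy => by
            rcases List.mem_append.1 hy with h | h
            · simp [hb y h, h0]
            · simp [hc y h, h0])]
        simp
      rw [hstep, ih (a ++ [x]) b c hxs (by intro y hy; rcases List.mem_append.1 hy with h | h
                                           · exact ha y h
                                           · simp at h; subst h; exact h0) hb hc]
      simp [h0]
    · have hstep : PySem.List.insertBy (fun p q => decide (k p < k q)) x (a ++ b ++ c)
          = a ++ (b ++ [x]) ++ c := by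
        rw [List.append_assoc, List.append_assoc, pvInsertBy_append _ _ a (b ++ c)
          (fun y hy => by simp [ha y hy, h1]),
          pvInsertBy_append _ _ b c (fun y hy => by simp [hb y hy, h1]),
          pvInsertBy_cons_all _ _ c (fun y hy => by simp [hc y hy, h1])]
        simp
      rw [hstep, ih a (b ++ [x]) c hxs ha (by intro y hy; rcases List.mem_append.1 hy with h | h
                                              · exact hb y h
                                              · simp at h; subst h; exact h1) hc]
      simp [h1]
    · have hstep : PySem.List.insertBy (fun p q => decide (k p < k q)) x (a ++ b ++ c)
          = a ++ b ++ (c ++ [x]) := by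
        rw [PySem.List.insertBy_of_forall_not_before _ _ _
          (fun y hy => by
            rcases List.mem_append.1 hy with h | h
            · rcases List.mem_append.1 h with h' | h'
              · simp [ha y h', h2]
              · simp [hb y h', h2]
            · simp [hc y h, h2])]
        simp
      rw [hstep, ih a b (c ++ [x]) hxs ha hb (by intro y hy; rcases List.mem_append.1 hy with h | h
                                                 · exact hc y h
                                                 · simp at h; subst h; exact h2)]
      simp [h2]

theorem pvKey_filter_0 (results : List (List (String × String))) :
    (results.filter pvIsPrio).filter (fun x => pvPrioKey x == 0)
      = results.filter (fun r => List.lookup "type" r == some "country") := by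
  rw [List.filter_filter]
  apply List.filter_congr
  intro r _
  unfold pvIsPrio pvPrioKey
  cases h : List.lookup "type" r with
  | none => simp
  | some t =>
    by_cases h1 : t = "country" <;> by_cases h2 : t = "sector" <;> by_cases h3 : t = "index" <;>
      simp_all

theorem pvKey_filter_1 (results : List (List (String × String))) :
    (results.filter pvIsPrio).filter (fun x => pvPrioKey x == 1)
      = results.filter (fun r => List.lookup "type" r == some "sector") := by
  rw [List.filter_filter]
  apply List.filter_congr
  intro r _
  unfold pvIsPrio pvPrioKey
  cases h : List.lookup "type" r with
  | none => simp
  | some t =>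
    by_cases h1 : t = "country" <;> by_cases h2 : t = "sector" <;> by_cases h3 : t = "index" <;>
      simp_all

theorem pvKey_filter_2 (results : List (List (String × String))) :
    (results.filter pvIsPrio).filter (fun x => pvPrioKey x == 2)
      = results.filter (fun r => List.lookup "type" r == some "index") := by
  rw [List.filter_filter]
  apply List.filter_congr
  intro r _
  unfold pvIsPrio pvPrioKey
  cases h : List.lookup "type" r with
  | none => simp
  | some t =>
    by_cases h1 : t = "country" <;> by_cases h2 : t = "sector" <;> by_cases h3 : t = "index" <;>
      simp_all

theorem pvKey_mem (r : List (String × String)) (h : pvIsPrio r = true) :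
    pvPrioKey r = 0 ∨ pvPrioKey r = 1 ∨ pvPrioKey r = 2 := by
  unfold pvIsPrio at h
  unfold pvPrioKey
  cases hl : List.lookup "type" r with
  | none => simp [hl] at h
  | some t => rw [hl] at h; simp at h; rcases h with (h|h)|h <;> subst h <;> decide

theorem pvKey_not_prio (r : List (String × String)) (h : pvIsPrio r = false) :
    pvPrioKey r = 3 := by
  unfold pvIsPrio at h
  unfold pvPrioKey
  cases hl : List.lookup "type" r with
  | none => rfl
  | some t => rw [hl] at h; simp at h; simp [h]

-- B's stable sort of the candidates IS A's three concatenated filter passes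
theorem pvSorted_eq_filters (results : List (List (String × String))) :
    PySem.List.sorted (results.filter pvIsPrio) pvPrioKey
      = (results.filter (fun r => List.lookup "type" r == some "country"))
          ++ ((results.filter (fun r => List.lookup "type" r == some "sector"))
          ++ (results.filter (fun r => List.lookup "type" r == some "index"))) := by
  rw [PySem.List.sorted_eq_foldl_insertBy]
  have h := pvFoldl_insertBy_groups pvPrioKey (results.filter pvIsPrio) [] [] []
    (fun x hx => pvKey_mem x (List.mem_filter.1 hx).2)
    (by simp) (by simp) (by simp)
  simp only [List.nil_append, List.append_nil] at h
  exact h.trans (by rw [pvKey_filter_0, pvKey_filter_1, pvKey_filter_2])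

-- with no priority-typed result every key is 3, so the stable sort is the identity
theorem pvSorted_fallback (results : List (List (String × String)))
    (h : results.filter pvIsPrio = []) :
    PySem.List.sorted results pvPrioKey = results := by
  apply PySem.List.sorted_eq_self_of_pairwise
  have h3 : ∀ r ∈ results, pvPrioKey r = 3 := fun r hr =>
    pvKey_not_prio r (by simpa using List.filter_eq_nil_iff.1 h r hr)
  rw [List.pairwise_iff_getElem]
  intro i j hi hj hij
  rw [h3 _ (List.getElem_mem hi), h3 _ (List.getElem_mem hj)]

-- which list each version feeds its final loop: they are the same list
theorem pvPick (results : List (List (String × String))) :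
    (if ((results.filter (fun r => List.lookup "type" r == some "country"))
          ++ ((results.filter (fun r => List.lookup "type" r == some "sector"))
          ++ (results.filter (fun r => List.lookup "type" r == some "index")))).isEmpty
     then results
     else (results.filter (fun r => List.lookup "type" r == some "country"))
          ++ ((results.filter (fun r => List.lookup "type" r == some "sector"))
          ++ (results.filter (fun r => List.lookup "type" r == some "index"))))
    = PySem.List.sorted
        (if (results.filter pvIsPrio).isEmpty then results else results.filter pvIsPrio)
        pvPrioKey := by
  by_cases hC : results.filter pvIsPrio = []
  · have hP : (results.filter (fun r => List.lookup "type" r == some "country"))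
        ++ ((results.filter (fun r => List.lookup "type" r == some "sector"))
        ++ (results.filter (fun r => List.lookup "type" r == some "index"))) = [] := by
      rw [← pvSorted_eq_filters, hC]
      simp [PySem.List.sorted_eq_nil_iff]
    rw [if_pos (by simp [hP]), if_pos (by simp [hC]), pvSorted_fallback results hC]
  · have hP : ¬ ((results.filter (fun r => List.lookup "type" r == some "country"))
        ++ ((results.filter (fun r => List.lookup "type" r == some "sector"))
        ++ (results.filter (fun r => List.lookup "type" r == some "index"))) = []) := by
      rw [← pvSorted_eq_filters]
      simpa [PySem.List.sorted_eq_nil_iff] using hC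
    rw [if_neg (by simpa [List.isEmpty_iff] using hP), if_neg (by simpa [List.isEmpty_iff] using hC),
      pvSorted_eq_filters]

-- ===== VERDICT (by name: the statement is the Claim_ definition above) =====
theorem select_exposure_lines_py_spec : Claim_equal_select_exposure_lines_py := by
  intro results limit _ _
  unfold Spec_select_exposure_lines_py
  simp only [select_exposure_lines_py, select_exposure_lines_py_alt]
  rw [pvGo_fuse]
  simp only [List.append_assoc]
  rw [pvPick]
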